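-- pv_equiv track=rewrite | github.com/jar-analyzer/jar-analyzer | skills/jar-audit-agent/engine/slicer.py | jvm_desc_arg_count
-- ===== SOURCE A (Python) =====
-- from typing import Optional
--
-- def jvm_desc_arg_count(method_desc: str) -> Optional[int]:
--     """Parse JVM method descriptor and return argument count.
--
--     Examples:
--       ()V -> 0
--       (Ljava/lang/String;I)[B -> 2
--       ([Ljava/lang/String;[[I)V -> 2
--     """
--     if not method_desc or "(" not in method_desc or ")" not in method_desc:
--         return None
--     try:
--         args = method_desc.split("(", 1)[1].split(")", 1)[0]
--     except Exception:
--         return None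
--     i = 0
--     n = 0
--     while i < len(args):
--         c = args[i]
--         if c == "[":
--             # array: skip all '[' then parse element
--             while i < len(args) and args[i] == "[":
--                 i += 1
--             continue
--         if c in "ZBCSIFJD":
--             n += 1
--             i += 1
--             continue
--         if c == "L":
--             # object type until ';'
--             semi = args.find(";", i)
--             if semi == -1:
--                 return None
--             n += 1
--             i = semi + 1
--             continue
--         # unknown token
--         return None
--     return n
-- ===== SOURCE B (Python) =====
-- import re
-- from typing import Optional
--
-- # One compiled regex for a single argument type token.
-- _ARG = re.compile(r"\[*(?:[ZBCSIFJD]|L[^;]*;)")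
--
-- def jvm_desc_arg_count(method_desc: str) -> Optional[int]:
--     if not method_desc or "(" not in method_desc or ")" not in method_desc:
--         return None
--     args = method_desc.split("(", 1)[1].split(")", 1)[0]
--     count = 0
--     pos = 0
--     while pos < len(args):
--         m = _ARG.match(args, pos)
--         if m is None:
--             return None
--         count += 1
--         pos = m.end()
--     return count
-- ===== Notes on version B (the rewrite author's own statement) =====
-- stated objective: idiomatic
-- what changed: Replaces A's hand-written index loop (nested array-bracket skipping plus a find for the semicolon terminator) by a single compiled regex for one argument token, matched repeatedly with a position pointer until the argument substring is consumed.
-- intended difference: On descriptors whose argument section is a valid token sequence followed by a trailing run of '[' with no element type (e.g. '([)V'), A silently skips the dangling brackets and returns the count of the preceding arguments, while B returns None; None is intended because such a descriptor is malformed. — e.g. on jvm_desc_arg_count("([)V"): A returns some 0, B returns none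
import Mathlib
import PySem

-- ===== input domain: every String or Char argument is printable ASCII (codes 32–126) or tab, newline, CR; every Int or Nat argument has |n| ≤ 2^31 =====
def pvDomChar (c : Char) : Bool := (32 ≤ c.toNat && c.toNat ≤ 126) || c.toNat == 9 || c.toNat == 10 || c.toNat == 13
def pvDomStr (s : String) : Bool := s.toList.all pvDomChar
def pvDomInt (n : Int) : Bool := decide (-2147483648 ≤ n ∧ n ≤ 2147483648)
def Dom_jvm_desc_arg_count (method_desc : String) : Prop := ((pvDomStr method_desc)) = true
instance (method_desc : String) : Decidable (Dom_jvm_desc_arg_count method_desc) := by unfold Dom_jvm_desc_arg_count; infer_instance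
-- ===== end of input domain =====

-- B replaces A's hand-written index/skip loop by one compiled regex for a single
-- argument token, matched repeatedly with a position pointer (objective: idiomatic);
-- on descriptors with dangling trailing '[' brackets in the argument section B
-- returns none where A returns a partial count — see D_ below.

-- ===== PORT A =====
-- A's while-loop over index i, transliterated as recursion over the remaining chars:
-- the inner '[' while-loop is dropWhile, 'L' scans to the next ';' (args.find(";", i)).
def jvmLoopA : List Char → Int → Option Int
  | [], n => some n
  | c :: rest, n =>
    if c == '[' then
      jvmLoopA (rest.dropWhile (· == '[')) n
    else if (['Z','B','C','S','I','F','J','D'] : List Char).contains c then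
      jvmLoopA rest (n + 1)
    else if c == 'L' then
      if h2 : rest.dropWhile (· ≠ ';') = [] then none   -- args.find(";", i) == -1
      else jvmLoopA (rest.dropWhile (· ≠ ';')).tail (n + 1)   -- i = semi + 1
    else none
termination_by l _ => l.length
decreasing_by
  · simpa using Nat.lt_succ_of_le (rest.length_dropWhile_le (· == '['))
  · simp
  · have h1 : (rest.dropWhile (· ≠ ';')).length ≤ rest.length :=
      rest.length_dropWhile_le (· ≠ ';')
    rcases h3 : rest.dropWhile (· ≠ ';') with _ | ⟨d, tl⟩
    · exact absurd h3 h2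
    · rw [h3] at h1; simp at h1 ⊢; omega

def jvm_desc_arg_count (method_desc : String) : Option Int :=
  let s := method_desc.toList
  if s = [] ∨ ¬ s.contains '(' ∨ ¬ s.contains ')' then none
  else
    -- args = method_desc.split("(", 1)[1].split(")", 1)[0]
    let args := ((s.dropWhile (· ≠ '(')).tail).takeWhile (· ≠ ')')
    jvmLoopA args 0

-- ===== PORT B =====
-- Exact model of _ARG.match(args, pos) with _ARG = `\[*(?:[ZBCSIFJD]|L[^;]*;)`:
-- the greedy `\[*` consumes the whole '[' run, and backtracking to a shorter run
-- can never succeed (that position holds '['), so drop-the-run-then-branch is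
-- exactly the engine's behaviour; `L[^;]*;` consumes through the first ';'.
-- Returns the suffix after the match (pos = m.end()); none when m is None.
def jvmMatchTok (l : List Char) : Option (List Char) :=
  match l.dropWhile (· == '[') with
  | [] => none
  | c :: rest =>
    if (['Z','B','C','S','I','F','J','D'] : List Char).contains c then some rest
    else if c == 'L' then
      match rest.dropWhile (· ≠ ';') with
      | [] => none
      | _ :: after => some after
    else none

theorem jvmMatchTok_lt (l rest : List Char) (h : jvmMatchTok l = some rest) :
    rest.length < l.length := by
  unfold jvmMatchTok at h
  have hd : (l.dropWhile (· == '[')).length ≤ l.length := l.length_dropWhile_le (· == '[')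
  rcases hdw : l.dropWhile (· == '[') with _ | ⟨c, tl⟩
  · rw [hdw] at h; simp at h
  · rw [hdw] at h
    rw [hdw] at hd
    simp only at h
    split_ifs at h with h1 h2
    · simp at h; subst h; simp at hd; omega
    · have htl : (tl.dropWhile (· ≠ ';')).length ≤ tl.length := tl.length_dropWhile_le _
      rcases hdw2 : tl.dropWhile (· ≠ ';') with _ | ⟨d, after⟩
      · rw [hdw2] at h; simp at h
      · rw [hdw2] at h; simp at h; subst h
        rw [hdw2] at htl
        simp at hd htl ⊢; omega

-- B's while loop: while pos < len(args): match one token, count it, advance.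
def jvmLoopB (l : List Char) (n : Int) : Option Int :=
  if l = [] then some n
  else if h : (jvmMatchTok l).isSome then
    jvmLoopB ((jvmMatchTok l).get h) (n + 1)
  else none
termination_by l.length
decreasing_by exact jvmMatchTok_lt l _ (Option.some_get h).symm

def jvm_desc_arg_count_alt (method_desc : String) : Option Int :=
  let s := method_desc.toList
  if s = [] ∨ ¬ s.contains '(' ∨ ¬ s.contains ')' then none
  else
    let args := ((s.dropWhile (· ≠ '(')).tail).takeWhile (· ≠ ')')
    jvmLoopB args 0

-- ===== PRECONDITION & SPEC =====
-- the argument substring between the first '(' and the first ')'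
def jvmArgsOf (method_desc : String) : List Char :=
  let l := method_desc.toList.drop (method_desc.toList.findIdx (· == '(') + 1)
  l.take (l.findIdx (· == ')'))

-- lax parse of a descriptor sequence, one character at a time: inObj = scanning
-- an 'L'…';' object name; a trailing '[' run before the end is not itself rejected
def jvmLax (l : List Char) (inObj : Bool) : Bool :=
  match l with
  | [] => !inObj
  | c :: rest =>
    if inObj then
      if c == ';' then jvmLax rest false else jvmLax rest true
    else if c == '[' then jvmLax rest false
    else if "ZBCSIFJD".toList.contains c then jvmLax rest false
    else if c == 'L' then jvmLax rest true
    else false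

-- On descriptors whose argument section is a valid token sequence followed by a
-- trailing run of '[' with no element type (e.g. "([)V"), A silently skips the
-- dangling brackets and returns the count of the preceding arguments, while B
-- returns none; none is intended because such a descriptor is malformed.
def D_jvm_desc_arg_count (method_desc : String) : Prop :=
  method_desc.toList.contains '(' = true ∧ method_desc.toList.contains ')' = true ∧
  (jvmArgsOf method_desc).getLast? = some '[' ∧ jvmLax (jvmArgsOf method_desc) false = true
instance (method_desc : String) : Decidable (D_jvm_desc_arg_count method_desc) := by
  unfold D_jvm_desc_arg_count; infer_instance

def Spec_jvm_desc_arg_count (method_desc : String) (out : Option Int) : Prop :=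
  ¬ D_jvm_desc_arg_count method_desc → out = jvm_desc_arg_count_alt method_desc
instance (method_desc : String) (out : Option Int) : Decidable (Spec_jvm_desc_arg_count method_desc out) := by
  unfold Spec_jvm_desc_arg_count; infer_instance

def pvDiffWitness_jvm_desc_arg_count : String := "([)V"
def pvDiffWitnessOut_jvm_desc_arg_count : (Option Int) × (Option Int) := (some 0, none)

-- ===== CLAIM (what is proved, stated in full; the proofs are below) =====
def Claim_unchanged_jvm_desc_arg_count : Prop := ∀ (method_desc : String), Dom_jvm_desc_arg_count method_desc → Spec_jvm_desc_arg_count method_desc (jvm_desc_arg_count method_desc)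
def Claim_changed_jvm_desc_arg_count : Prop := Dom_jvm_desc_arg_count (pvDiffWitness_jvm_desc_arg_count) ∧ D_jvm_desc_arg_count (pvDiffWitness_jvm_desc_arg_count) ∧ jvm_desc_arg_count (pvDiffWitness_jvm_desc_arg_count) = pvDiffWitnessOut_jvm_desc_arg_count.1 ∧ jvm_desc_arg_count_alt (pvDiffWitness_jvm_desc_arg_count) = pvDiffWitnessOut_jvm_desc_arg_count.2 ∧ pvDiffWitnessOut_jvm_desc_arg_count.1 ≠ pvDiffWitnessOut_jvm_desc_arg_count.2
def Claim_exact_jvm_desc_arg_count : Prop := ∀ (method_desc : String), Dom_jvm_desc_arg_count method_desc → D_jvm_desc_arg_count method_desc → jvm_desc_arg_count method_desc ≠ jvm_desc_arg_count_alt method_desc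

-- ===== LEMMAS AND PROOFS =====

-- drop past the first '(' expressed two ways
theorem jvmDropTail_eq (l : List Char) :
    (l.dropWhile (· ≠ '(')).tail = l.drop (l.findIdx (· == '(') + 1) := by
  induction l with
  | nil => rfl
  | cons a t ih =>
    by_cases ha : a = '('
    · subst ha
      rw [List.dropWhile_cons_of_neg (by simp)]
      simp [List.findIdx_cons]
    · rw [List.dropWhile_cons_of_pos (by simpa using ha)]
      simp only [List.findIdx_cons, show (a == '(') = false by simpa using ha,
        cond_false, List.drop_succ_cons]
      exact ih

-- keep up to the first ')' expressed two ways
theorem jvmTakeWhile_eq (l : List Char) :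
    l.takeWhile (· ≠ ')') = l.take (l.findIdx (· == ')')) := by
  induction l with
  | nil => rfl
  | cons a t ih =>
    by_cases ha : a = ')'
    · subst ha
      rw [List.takeWhile_cons_of_neg (by simp)]
      simp [List.findIdx_cons]
    · rw [List.takeWhile_cons_of_pos (by simpa using ha)]
      simp only [List.findIdx_cons, show (a == ')') = false by simpa using ha,
        cond_false, List.take_succ_cons]
      rw [ih]

theorem jvmArgsOf_eq (s : String) :
    ((s.toList.dropWhile (· ≠ '(')).tail).takeWhile (· ≠ ')') = jvmArgsOf s := by
  rw [jvmArgsOf, jvmTakeWhile_eq, jvmDropTail_eq]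

theorem jvmDropHead_false (p : Char → Bool) (l : List Char) (d : Char) (tl : List Char)
    (h : l.dropWhile p = d :: tl) : p d = false := by
  induction l with
  | nil => simp at h
  | cons a l ih =>
    by_cases hp : p a
    · rw [List.dropWhile_cons_of_pos hp] at h; exact ih h
    · rw [List.dropWhile_cons_of_neg hp] at h
      cases h; simpa using hp

-- proof-only: the same automaton with an explicit pending-'['-run flag and a
-- strict/lax switch; jvmMain is proved against it, then D_'s condition is shown
-- equivalent (the lax run with a last character '[')
def jvmDfa (l : List Char) (trailingOK pending inObj : Bool) : Bool :=
  match l with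
  | [] => !inObj && (!pending || trailingOK)
  | c :: rest =>
    if inObj then
      if c == ';' then jvmDfa rest trailingOK false false
      else jvmDfa rest trailingOK pending true
    else if c == '[' then jvmDfa rest trailingOK true false
    else if c == 'Z' || c == 'B' || c == 'C' || c == 'S' || c == 'I' || c == 'F' || c == 'J' || c == 'D' then
      jvmDfa rest trailingOK false false
    else if c == 'L' then jvmDfa rest trailingOK pending true
    else false

-- a primitive-type character is not '['
theorem jvmPrim_ne (c : Char)
    (h : (c == 'Z' || c == 'B' || c == 'C' || c == 'S' || c == 'I' || c == 'F' || c == 'J' || c == 'D') = true) :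
    (c == '[') = false := by
  simp only [Bool.or_eq_true, beq_iff_eq, or_assoc] at h
  rcases h with rfl | rfl | rfl | rfl | rfl | rfl | rfl | rfl <;> decide

-- the or-chain is the string membership test jvmLax uses
theorem jvmPrim_str (c : Char) :
    (c == 'Z' || c == 'B' || c == 'C' || c == 'S' || c == 'I' || c == 'F' || c == 'J' || c == 'D') =
    "ZBCSIFJD".toList.contains c := by
  rw [show "ZBCSIFJD".toList = ['Z','B','C','S','I','F','J','D'] from rfl]
  simp [Bool.or_assoc, Bool.beq_eq_decide_eq]

-- with trailing brackets allowed the pending flag is dead: jvmDfa _ true = jvmLax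
theorem jvmDfa_lax (l : List Char) (p i : Bool) : jvmDfa l true p i = jvmLax l i := by
  induction l generalizing p i with
  | nil => cases i <;> simp [jvmDfa, jvmLax]
  | cons c rest ih =>
    rw [jvmDfa, jvmLax]
    simp only [jvmPrim_str]
    split_ifs <;> first | exact ih _ _ | rfl

-- the strict run accepts exactly when the lax run accepts and, unless the input
-- is empty (where the incoming pending flag decides), the last character is not '['
theorem jvmDfa_strict (l : List Char) (p i : Bool) :
    jvmDfa l false p i =
      (jvmLax l i && match l.getLast? with
        | none => !p
        | some c => !(c == '[')) := by
  induction l generalizing p i with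
  | nil => cases i <;> cases p <;> simp [jvmDfa, jvmLax]
  | cons a t ih =>
    rcases t with _ | ⟨b, t'⟩
    · rw [jvmDfa, jvmLax]
      simp only [List.getLast?_singleton, jvmPrim_str]
      split_ifs with h1 h2 h3 h4 h5
      · have ha : (a == '[') = false := by
          rw [show a = ';' by simpa using h2]; decide
        simp [jvmDfa, jvmLax, ha]
      · simp [jvmDfa, jvmLax]
      · simp [jvmDfa, jvmLax, h3]
      · simp [jvmDfa, jvmLax, jvmPrim_ne a (by rw [jvmPrim_str]; exact h4)]
      · simp [jvmDfa, jvmLax]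
      · simp
    · have hlast : (a :: b :: t').getLast? = (b :: t').getLast? := List.getLast?_cons_cons
      obtain ⟨c0, hc0⟩ := Option.isSome_iff_exists.mp
        (show ((b :: t').getLast?).isSome by simp [List.getLast?_isSome])
      rw [hlast, hc0, jvmDfa, jvmLax]
      simp only [jvmPrim_str]
      split_ifs <;> first
        | (rw [ih, hc0])
        | simp

-- D_'s condition is exactly the pair of automaton values jvmMain splits on
theorem jvmCond_iff (l : List Char) :
    (jvmDfa l true false false = true ∧ jvmDfa l false false false = false) ↔
      (l.getLast? = some '[' ∧ jvmLax l false = true) := by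
  rw [jvmDfa_lax, jvmDfa_strict]
  rcases hl : l.getLast? with _ | c
  · simp
  · by_cases hc : c = '['
    · subst hc; simp [and_comm]
    · simp [hc]

-- the or-chain is the membership test in the primitive-type set
theorem jvmPrim_eq (c : Char) :
    (c == 'Z' || c == 'B' || c == 'C' || c == 'S' || c == 'I' || c == 'F' || c == 'J' || c == 'D') =
    (['Z','B','C','S','I','F','J','D'] : List Char).contains c := by
  simp [Bool.or_assoc, Bool.beq_eq_decide_eq]

-- inside an object name the automaton scans to the first ';'
theorem jvmDfa_obj (r : List Char) (b p : Bool) :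
    jvmDfa r b p true =
      if r.dropWhile (· ≠ ';') = [] then false
      else jvmDfa ((r.dropWhile (· ≠ ';')).tail) b false false := by
  induction r generalizing p with
  | nil => simp [jvmDfa]
  | cons c rest ih =>
    by_cases hc : c = ';'
    · subst hc
      rw [jvmDfa, if_pos rfl, if_pos (by decide), List.dropWhile_cons_of_neg (by simp),
        if_neg (by simp), List.tail_cons]
    · rw [jvmDfa, if_pos rfl, if_neg (by simpa using hc),
        List.dropWhile_cons_of_pos (by simpa using hc)]
      exact ih p

-- a list that is one '[' run is accepted exactly when trailing brackets are allowed
theorem jvmDfa_run (l : List Char) (b p : Bool) (h : l.dropWhile (· == '[') = [])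
    (hne : l ≠ []) : jvmDfa l b p false = b := by
  induction l generalizing p with
  | nil => exact absurd rfl hne
  | cons a t ih =>
    have ha : a = '[' := by
      by_cases h' : a = '['
      · exact h'
      · rw [List.dropWhile_cons_of_neg (by simpa using h')] at h; simp at h
    subst ha
    rw [List.dropWhile_cons_of_pos (by decide)] at h
    rw [jvmDfa, if_neg (by simp), if_pos (by decide)]
    rcases t with _ | ⟨x, xs⟩
    · simp [jvmDfa]
    · exact ih true h (by simp)

-- past the leading '[' run the automaton consumes one element type
theorem jvmDfa_elem (l : List Char) (c : Char) (r : List Char) (b p : Bool)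
    (h : l.dropWhile (· == '[') = c :: r) :
    jvmDfa l b p false =
      if c == 'Z' || c == 'B' || c == 'C' || c == 'S' || c == 'I' || c == 'F' || c == 'J' || c == 'D' then
        jvmDfa r b false false
      else if c == 'L' then
        if r.dropWhile (· ≠ ';') = [] then false
        else jvmDfa ((r.dropWhile (· ≠ ';')).tail) b false false
      else false := by
  induction l generalizing p with
  | nil => simp at h
  | cons a t ih =>
    by_cases ha : a = '['
    · subst ha
      rw [List.dropWhile_cons_of_pos (by decide)] at h
      rw [jvmDfa, if_neg (by simp), if_pos (by decide)]
      exact ih true h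
    · rw [List.dropWhile_cons_of_neg (by simpa using ha)] at h
      obtain ⟨rfl, rfl⟩ : a = c ∧ t = r := by
        constructor <;> [exact (List.cons.injEq _ _ _ _ ▸ h).1;
          exact (List.cons.injEq _ _ _ _ ▸ h).2]
      rw [jvmDfa, if_neg (by simp), if_neg (by simpa using ha), jvmDfa_obj t b p]

-- A's '['-skipping inner loop: jvmLoopA ignores a leading '[' run
theorem jvmLoopA_drop (l : List Char) (n : Int) :
    jvmLoopA l n = jvmLoopA (l.dropWhile (· == '[')) n := by
  rcases l with _ | ⟨c, rest⟩
  · rfl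
  · by_cases hc : c = '['
    · subst hc
      rw [jvmLoopA, if_pos (by decide), List.dropWhile_cons_of_pos (by decide)]
    · rw [List.dropWhile_cons_of_neg (by simpa using hc)]

theorem jvmLoopB_nil (n : Int) : jvmLoopB [] n = some n := by
  rw [jvmLoopB]; simp

theorem jvmLoopB_some {l r : List Char} (n : Int) (hl : l ≠ [])
    (h : jvmMatchTok l = some r) : jvmLoopB l n = jvmLoopB r (n + 1) := by
  rw [jvmLoopB, if_neg hl, dif_pos (by simp [h])]
  congr 1
  simp [h]

theorem jvmLoopB_none {l : List Char} (n : Int) (hl : l ≠ [])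
    (h : jvmMatchTok l = none) : jvmLoopB l n = none := by
  rw [jvmLoopB, if_neg hl, dif_neg (by simp [h])]

-- Combined step lemma, by strong induction following the token structure:
-- inside D's condition A succeeds while B fails; outside it they agree.
theorem jvmMain (l : List Char) (n : Int) :
    (jvmDfa l true false false = true ∧ jvmDfa l false false false = false →
       jvmLoopB l n = none ∧ (jvmLoopA l n).isSome = true) ∧
    (¬ (jvmDfa l true false false = true ∧ jvmDfa l false false false = false) →
       jvmLoopA l n = jvmLoopB l n) := by
  rcases l with _ | ⟨a, t⟩
  · constructor
    · intro hD; exact absurd hD.2 (by decide)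
    · intro _; rw [jvmLoopB_nil]; simp [jvmLoopA]
  · have hAdrop := jvmLoopA_drop (a :: t) n
    rcases hdw : (a :: t).dropWhile (· == '[') with _ | ⟨c, r⟩
    · -- pure '[' run: A skips it and returns n, B fails to match
      constructor
      · intro _
        refine ⟨jvmLoopB_none n (by simp) (by unfold jvmMatchTok; rw [hdw]), ?_⟩
        rw [hAdrop, hdw]; simp [jvmLoopA]
      · intro hND
        exact absurd ⟨jvmDfa_run (a :: t) true false hdw (by simp),
          jvmDfa_run (a :: t) false false hdw (by simp)⟩ hND
    · have hc_not : (c == '[') = false :=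
        jvmDropHead_false (fun x => x == '[') (a :: t) c r hdw
      have hrlen : r.length < t.length + 1 := by
        have := (a :: t).length_dropWhile_le (· == '[')
        rw [hdw] at this; simp at this ⊢; omega
      by_cases hp : (['Z','B','C','S','I','F','J','D'] : List Char).contains c
      · -- primitive token: A, B and the automaton all step to r
        have hm : jvmMatchTok (a :: t) = some r := by
          unfold jvmMatchTok; rw [hdw]; simp only; rw [if_pos hp]
        have hA : jvmLoopA (a :: t) n = jvmLoopA r (n + 1) := by
          rw [hAdrop, hdw, jvmLoopA, if_neg (by simp [hc_not]), if_pos hp]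
        have hB : jvmLoopB (a :: t) n = jvmLoopB r (n + 1) := jvmLoopB_some n (by simp) hm
        have hS : ∀ b, jvmDfa (a :: t) b false false = jvmDfa r b false false := fun b => by
          rw [jvmDfa_elem (a :: t) c r b false hdw, jvmPrim_eq c, if_pos hp]
        have ih := jvmMain r (n + 1)
        constructor
        · intro hD; rw [hB, hA]; exact ih.1 ⟨(hS true ▸ hD.1), (hS false ▸ hD.2)⟩
        · intro hND; rw [hA, hB]
          exact ih.2 (fun hD => hND ⟨(hS true).trans hD.1, (hS false).trans hD.2⟩)
      · by_cases hL : c = 'L'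
        · subst hL
          rcases hdw2 : r.dropWhile (· ≠ ';') with _ | ⟨d, after⟩
          · -- 'L' with no ';': everything fails
            have hm : jvmMatchTok (a :: t) = none := by
              unfold jvmMatchTok; rw [hdw]; simp only
              rw [if_neg hp, if_pos (by decide), hdw2]
            constructor
            · intro hD
              refine absurd hD.1 ?_
              rw [jvmDfa_elem (a :: t) 'L' r true false hdw, jvmPrim_eq 'L',
                if_neg hp, if_pos (by decide), if_pos hdw2]
              simp
            · intro _
              rw [hAdrop, hdw, jvmLoopA, if_neg (by simp [hc_not]), if_neg hp,
                if_pos (by decide), dif_pos hdw2, jvmLoopB_none n (by simp) hm]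
          · -- object token through the ';'
            have hm : jvmMatchTok (a :: t) = some after := by
              unfold jvmMatchTok; rw [hdw]; simp only
              rw [if_neg hp, if_pos (by decide), hdw2]
            have hA : jvmLoopA (a :: t) n = jvmLoopA after (n + 1) := by
              rw [hAdrop, hdw, jvmLoopA, if_neg (by simp [hc_not]), if_neg hp,
                if_pos (by decide), dif_neg (by rw [hdw2]; simp), hdw2, List.tail_cons]
            have hB : jvmLoopB (a :: t) n = jvmLoopB after (n + 1) :=
              jvmLoopB_some n (by simp) hm
            have hS : ∀ b, jvmDfa (a :: t) b false false = jvmDfa after b false false :=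
              fun b => by
                rw [jvmDfa_elem (a :: t) 'L' r b false hdw, jvmPrim_eq 'L',
                  if_neg hp, if_pos (by decide), if_neg (by rw [hdw2]; simp),
                  hdw2, List.tail_cons]
            have hafter : after.length < t.length + 1 := by
              have := r.length_dropWhile_le (· ≠ ';')
              rw [hdw2] at this; simp at this; omega
            have ih := jvmMain after (n + 1)
            constructor
            · intro hD; rw [hB, hA]; exact ih.1 ⟨(hS true ▸ hD.1), (hS false ▸ hD.2)⟩
            · intro hND; rw [hA, hB]
              exact ih.2 (fun hD => hND ⟨(hS true).trans hD.1, (hS false).trans hD.2⟩)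
        · -- unknown token: everything fails
          have hm : jvmMatchTok (a :: t) = none := by
            unfold jvmMatchTok; rw [hdw]; simp only
            rw [if_neg hp, if_neg (by simpa using hL)]
          constructor
          · intro hD
            refine absurd hD.1 ?_
            rw [jvmDfa_elem (a :: t) c r true false hdw, jvmPrim_eq c,
              if_neg hp, if_neg (by simpa using hL)]
            simp
          · intro _
            rw [hAdrop, hdw, jvmLoopA, if_neg (by simp [hc_not]), if_neg hp,
              if_neg (by simpa using hL), jvmLoopB_none n (by simp) hm]
termination_by l.length
decreasing_by
  · simpa using hrlen
  · simpa using hafter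

-- ===== VERDICT (by name: the statement is the Claim_ definition above) =====
theorem jvm_desc_arg_count_spec : Claim_unchanged_jvm_desc_arg_count := by
  intro s _ hND
  unfold jvm_desc_arg_count jvm_desc_arg_count_alt
  simp only
  split_ifs with h
  · rfl
  · rw [jvmArgsOf_eq]
    refine (jvmMain _ 0).2 (fun hD => hND ?_)
    have hcond := (jvmCond_iff (jvmArgsOf s)).mp hD
    push Not at h
    exact ⟨h.2.1, h.2.2, hcond.1, hcond.2⟩

theorem jvm_desc_arg_count_changed : Claim_changed_jvm_desc_arg_count := by
  unfold Claim_changed_jvm_desc_arg_count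
  refine ⟨by decide, by decide, ?_, ?_, by decide⟩
  · show jvm_desc_arg_count "([)V" = some 0
    rw [jvm_desc_arg_count]
    rw [if_neg (by decide)]
    show jvmLoopA ['['] 0 = some 0
    rw [jvmLoopA, if_pos (by decide)]
    simp [jvmLoopA]
  · show jvm_desc_arg_count_alt "([)V" = none
    rw [jvm_desc_arg_count_alt]
    rw [if_neg (by decide)]
    show jvmLoopB ['['] 0 = none
    exact jvmLoopB_none 0 (by simp) (by decide)

theorem jvm_desc_arg_count_tight : Claim_exact_jvm_desc_arg_count := by
  intro s _ hD heq
  obtain ⟨hp, hq, h1, h2⟩ := hD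
  have hmain := (jvmMain (jvmArgsOf s) 0).1 ((jvmCond_iff (jvmArgsOf s)).mpr ⟨h1, h2⟩)
  have hg : ¬ (s.toList = [] ∨ ¬ s.toList.contains '(' ∨ ¬ s.toList.contains ')') := by
    intro hor
    rcases hor with h0 | h0 | h0
    · rw [h0] at hp; simp at hp
    · exact h0 hp
    · exact h0 hq
  rw [jvm_desc_arg_count, jvm_desc_arg_count_alt] at heq
  simp only at heq
  rw [if_neg hg, if_neg hg] at heq
  rw [jvmArgsOf_eq] at heq
  rw [heq, hmain.1] at hmain
  simp at hmain
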